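-- pv_equiv track=rewrite | github.com/yanpan9/Some-Code | Math/201.py | residuals
-- ===== SOURCE A (Python) =====
-- from typing import List
--
-- def residuals(lst: List[int]) -> List[int]:
--     s, b = 2, 1
--     res = list()
--     sum_ = 0
--     for num in lst:
--         sum_ += num*b
--         res.append(s-sum_)
--         s, b = s<<1, s
--     return res
-- ===== SOURCE B (Python) =====
-- from typing import List
--
-- def residuals(lst: List[int]) -> List[int]:
--     # total weighted sum via Horner from the right, then a right-to-left pass
--     # with suffix sums, building the output back-to-front.
--     total = 0
--     for a in reversed(lst):
--         total = a + 2 * total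
--     out = []
--     rest = 0                 # suffix weighted sum of elements already seen
--     p = 1 << len(lst)
--     for a in reversed(lst):
--         p >>= 1
--         out.append(2 * p - (total - rest))
--         rest += a * p
--     out.reverse()
--     return out
-- ===== Notes on version B (the rewrite author's own statement) =====
-- stated objective: alternative
-- what changed: Instead of A's left-to-right fused loop that maintains running prefix sums and powers, B first computes the total weighted sum by a Horner evaluation from the right, then walks the list right-to-left maintaining only a suffix weighted sum (each residual is 2^(i+1) - (total - suffix)), building the output back-to-front and reversing it once.
import Mathlib
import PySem

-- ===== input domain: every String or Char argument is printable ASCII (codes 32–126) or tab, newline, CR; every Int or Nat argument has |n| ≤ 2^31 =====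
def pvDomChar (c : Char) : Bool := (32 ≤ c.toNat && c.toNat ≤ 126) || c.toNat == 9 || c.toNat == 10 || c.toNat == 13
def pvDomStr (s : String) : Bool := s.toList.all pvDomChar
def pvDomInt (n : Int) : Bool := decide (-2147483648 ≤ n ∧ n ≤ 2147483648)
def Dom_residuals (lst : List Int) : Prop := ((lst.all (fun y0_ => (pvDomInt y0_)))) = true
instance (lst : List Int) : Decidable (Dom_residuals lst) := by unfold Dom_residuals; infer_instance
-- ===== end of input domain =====

-- B replaces A's left-to-right fused prefix-sum loop by a Horner total plus a
-- right-to-left pass over suffix sums, building the output back-to-front; alternative decomposition, same cost.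

-- ===== PORT A =====
-- A's loop state: (s, b, sum_, res)
def residuals (lst : List Int) : List Int :=
  (lst.foldl
    (fun (st : Int × Int × Int × List Int) num =>
      let s := st.1; let b := st.2.1; let sum_ := st.2.2.1; let res := st.2.2.2
      let sum_' := sum_ + num * b
      (s * 2, s, sum_', res ++ [s - sum_']))
    (2, 1, 0, [])).2.2.2

-- ===== PORT B =====
-- first loop: Horner evaluation of the total weighted sum, right to left;
-- second loop: right-to-left with suffix sum `rest`, `p >>= 1` ported as floordiv by 2,
-- output appended back-to-front and reversed at the end.
def residuals_alt (lst : List Int) : List Int :=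
  let total := lst.reverse.foldl (fun t a => a + 2 * t) 0
  let st := lst.reverse.foldl
    (fun (st : List Int × Int × Int) a =>
      let out := st.1; let rest := st.2.1; let p := st.2.2
      let p' := PySem.Int.floordiv p 2
      (out ++ [2 * p' - (total - rest)], rest + a * p', p'))
    ([], (0 : Int), (2 : Int) ^ lst.length)
  st.1.reverse

-- ===== PRECONDITION & SPEC =====
def Spec_residuals (lst : List Int) (out : List Int) : Prop := out = residuals_alt lst
instance (lst : List Int) (out : List Int) : Decidable (Spec_residuals lst out) := by unfold Spec_residuals; infer_instance

-- ===== CLAIM (what is proved, stated in full; the proofs are below) =====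
def Claim_equal_residuals : Prop := ∀ (lst : List Int), Dom_residuals lst → Spec_residuals lst (residuals lst)

-- ===== LEMMAS AND PROOFS =====

-- common closed characterization of both outputs: index k, prefix weighted sum sm
def pvSpecList (k : Nat) (sm : Int) : List Int → List Int
  | [] => []
  | x :: xs => (2 ^ (k + 1) - (sm + x * 2 ^ k)) :: pvSpecList (k + 1) (sm + x * 2 ^ k) xs

theorem pvA_gen (lst : List Int) : ∀ (k : Nat) (sm : Int) (res : List Int),
    (lst.foldl
      (fun (st : Int × Int × Int × List Int) num =>
        let s := st.1; let b := st.2.1; let sum_ := st.2.2.1; let res := st.2.2.2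
        let sum_' := sum_ + num * b
        (s * 2, s, sum_', res ++ [s - sum_']))
      ((2 : Int) ^ (k + 1), (2 : Int) ^ k, sm, res)).2.2.2
    = res ++ pvSpecList k sm lst := by
  induction lst with
  | nil => intro k sm res; simp [pvSpecList]
  | cons x xs ih =>
    intro k sm res
    simp only [List.foldl, pvSpecList]
    have h2 : (2 : Int) ^ (k + 1) * 2 = 2 ^ (k + 1 + 1) := by ring
    rw [h2, ih (k + 1) (sm + x * 2 ^ k) (res ++ [2 ^ (k + 1) - (sm + x * 2 ^ k)])]
    simp

-- suffix weighted sum: pvWs q zs = Σ zs_i · 2^(q+i)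
def pvWs (q : Nat) : List Int → Int
  | [] => 0
  | z :: zs => z * 2 ^ q + pvWs (q + 1) zs

-- what B's second loop accumulates in `out` (back-to-front)
def pvOuts (T : Int) (q : Nat) : List Int → List Int
  | [] => []
  | z :: zs => pvOuts T (q + 1) zs ++ [2 * 2 ^ q - (T - pvWs (q + 1) zs)]

theorem pv_half_pow (q : Nat) : PySem.Int.floordiv ((2 : Int) ^ (q + 1)) 2 = 2 ^ q := by
  rw [PySem.Int.floordiv_eq_ediv_of_pos (by norm_num)]
  rw [pow_succ]
  exact Int.mul_ediv_cancel _ (by norm_num)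

theorem pvB_fold (T : Int) (zs : List Int) : ∀ (q : Nat),
    zs.foldr
      (fun a (st : List Int × Int × Int) =>
        let out := st.1; let rest := st.2.1; let p := st.2.2
        let p' := PySem.Int.floordiv p 2
        (out ++ [2 * p' - (T - rest)], rest + a * p', p'))
      ([], (0 : Int), (2 : Int) ^ (q + zs.length))
    = (pvOuts T q zs, pvWs q zs, 2 ^ q) := by
  induction zs with
  | nil => intro q; simp [pvOuts, pvWs]
  | cons z zs ih =>
    intro q
    have h : q + (z :: zs).length = (q + 1) + zs.length := by simp; omega
    simp only [List.foldr, h, ih (q + 1), pvOuts, pvWs, pv_half_pow q]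
    simp only [Prod.mk.injEq]
    exact ⟨trivial, by ring, trivial⟩

theorem pvB_total (zs : List Int) : ∀ (q : Nat),
    2 ^ q * zs.foldr (fun a t => a + 2 * t) 0 = pvWs q zs := by
  induction zs with
  | nil => intro q; simp [pvWs]
  | cons z zs ih =>
    intro q
    simp only [List.foldr, pvWs, ← ih (q + 1)]
    ring

theorem pvB_rev (zs : List Int) : ∀ (q : Nat) (sm T : Int), T = sm + pvWs q zs →
    (pvOuts T q zs).reverse = pvSpecList q sm zs := by
  induction zs with
  | nil => intro q sm T _; simp [pvOuts, pvSpecList]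
  | cons z zs ih =>
    intro q sm T hT
    simp only [pvOuts, pvSpecList, List.reverse_append, List.reverse_cons, List.reverse_nil,
      List.nil_append, List.singleton_append]
    have hT' : T = (sm + z * 2 ^ q) + pvWs (q + 1) zs := by
      rw [hT]; simp [pvWs]; ring
    rw [ih (q + 1) (sm + z * 2 ^ q) T hT']
    congr 1
    rw [hT']; ring

-- ===== VERDICT (by name: the statement is the Claim_ definition above) =====
theorem residuals_spec : Claim_equal_residuals := by
  intro lst _
  show residuals lst = residuals_alt lst
  unfold residuals residuals_alt
  dsimp only
  have hA := pvA_gen lst 0 0 []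
  norm_num at hA
  rw [hA]
  rw [List.foldl_reverse, List.foldl_reverse]
  have hT : lst.foldr (fun a t => a + 2 * t) 0 = pvWs 0 lst := by
    have := pvB_total lst 0; simpa using this
  have hF := pvB_fold (lst.foldr (fun a t => a + 2 * t) 0) lst 0
  simp only [Nat.zero_add] at hF
  rw [hF]
  exact (pvB_rev lst 0 0 _ (by simpa using hT)).symm
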